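-- pv_equiv track=rewrite | github.com/Ahmad-Mahmoudi-coder/Process-Heat-RDM | src/gxp_signals_consumer.py | extract_eval_year
-- ===== SOURCE A (Python) =====
-- def extract_eval_year(epoch_tag: str) -> int:
--     """Extract evaluation year from epoch tag (e.g., '2035_BB' -> 2035)."""
--     # Extract leading digits
--     year_str = ''
--     for char in epoch_tag:
--         if char.isdigit():
--             year_str += char
--         elif year_str:
--             break
--
--     if not year_str:
--         raise ValueError(f"Could not extract year from epoch_tag: {epoch_tag}")
--
--     return int(year_str)
-- ===== SOURCE B (Python) =====
-- def extract_eval_year(epoch_tag: str) -> int: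
--     """Extract evaluation year from epoch tag (e.g., '2035_BB' -> 2035)."""
--     # Two-phase index scan: find the first digit, then the end of the digit run,
--     # and slice that run out in one go.
--     n = len(epoch_tag)
--     i = 0
--     while i < n and not epoch_tag[i].isdigit():
--         i += 1
--     j = i
--     while j < n and epoch_tag[j].isdigit():
--         j += 1
--     digits = epoch_tag[i:j]
--     if not digits:
--         raise ValueError(f"Could not extract year from epoch_tag: {epoch_tag}")
--     return int(digits)
-- ===== Notes on version B (the rewrite author's own statement) =====
-- stated objective: alternative
-- what changed: Replaces the flag-driven character-accumulating loop (string concatenation per digit) with a two-phase index scan that finds the start and end of the first digit run and slices it out once.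
import Mathlib
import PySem

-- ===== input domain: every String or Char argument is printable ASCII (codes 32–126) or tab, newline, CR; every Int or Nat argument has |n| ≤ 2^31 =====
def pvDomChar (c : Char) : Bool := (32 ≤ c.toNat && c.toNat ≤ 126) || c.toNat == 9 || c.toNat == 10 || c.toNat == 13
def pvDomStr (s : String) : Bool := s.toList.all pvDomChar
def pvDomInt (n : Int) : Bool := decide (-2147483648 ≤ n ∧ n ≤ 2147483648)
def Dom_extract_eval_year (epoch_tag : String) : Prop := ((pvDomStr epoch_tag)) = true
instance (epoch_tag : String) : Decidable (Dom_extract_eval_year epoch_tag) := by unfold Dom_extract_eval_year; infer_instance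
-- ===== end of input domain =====

-- B replaces A's flag-driven accumulating loop by a two-phase index scan plus one slice
-- (objective: alternative decomposition, same cost). Where A raises ValueError (no digit
-- in the tag) both ports return 0; those inputs are excluded by Pre_.

-- ===== PORT A =====
-- A's loop: accumulate digits into year_str, break at the first non-digit once year_str is nonempty.
def pvLoopA : List Char → List Char → List Char
  | [], acc => acc
  | c :: cs, acc =>
    if PySem.Chars.isdigit c then pvLoopA cs (acc ++ [c])
    else if acc ≠ [] then acc
    else pvLoopA cs acc

def extract_eval_year (epoch_tag : String) : Int :=
  let year_str := pvLoopA epoch_tag.toList []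
  if year_str = [] then 0   -- Python raises ValueError here; excluded by Pre_
  else (PySem.Int.ofChars? year_str).getD 0

-- ===== PORT B =====
-- first while loop: advance i while i < n and not s[i].isdigit()
def pvSkipB (s : List Char) (i : Nat) : Nat :=
  if h : i < s.length then
    if !(PySem.Chars.isdigit s[i]) then pvSkipB s (i + 1) else i
  else i
termination_by s.length - i

-- second while loop: advance j while j < n and s[j].isdigit()
def pvRunB (s : List Char) (j : Nat) : Nat :=
  if h : j < s.length then
    if PySem.Chars.isdigit s[j] then pvRunB s (j + 1) else j
  else j
termination_by s.length - j

def extract_eval_year_alt (epoch_tag : String) : Int :=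
  let s := epoch_tag.toList
  let i := pvSkipB s 0
  let j := pvRunB s i
  let digits := PySem.Chars.slice s (some (i : Int)) (some (j : Int))
  if digits = [] then 0   -- Python raises ValueError here; excluded by Pre_
  else (PySem.Int.ofChars? digits).getD 0

-- ===== PRECONDITION & SPEC =====
-- Python A raises ValueError exactly when the tag contains no digit; Pre_ excludes those inputs.
def Pre_extract_eval_year (epoch_tag : String) : Prop :=
  epoch_tag.toList.any PySem.Chars.isdigit = true
instance (epoch_tag : String) : Decidable (Pre_extract_eval_year epoch_tag) := by
  unfold Pre_extract_eval_year; infer_instance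
def pvWitness_extract_eval_year : String := "2035_BB"

def Spec_extract_eval_year (epoch_tag : String) (out : Int) : Prop := out = extract_eval_year_alt epoch_tag
instance (epoch_tag : String) (out : Int) : Decidable (Spec_extract_eval_year epoch_tag out) := by unfold Spec_extract_eval_year; infer_instance

-- ===== CLAIM (what is proved, stated in full; the proofs are below) =====
def Claim_equal_extract_eval_year : Prop := ∀ (epoch_tag : String), Dom_extract_eval_year epoch_tag → Pre_extract_eval_year epoch_tag → Spec_extract_eval_year epoch_tag (extract_eval_year epoch_tag)

-- ===== LEMMAS AND PROOFS =====

-- Once the accumulator is nonempty, A's loop appends exactly the leading digit run.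
theorem pvLoopA_nonempty (cs : List Char) : ∀ acc : List Char, acc ≠ [] →
    pvLoopA cs acc = acc ++ cs.takeWhile PySem.Chars.isdigit := by
  induction cs with
  | nil => intro acc _; simp [pvLoopA]
  | cons c cs ih =>
    intro acc hacc
    by_cases hd : PySem.Chars.isdigit c
    · simp [pvLoopA, hd, ih (acc ++ [c]) (by simp)]
    · simp [pvLoopA, hd, hacc]

-- With an empty accumulator, A's loop computes the first maximal digit run.
theorem pvLoopA_empty (cs : List Char) :
    pvLoopA cs [] = (cs.dropWhile (fun c => !PySem.Chars.isdigit c)).takeWhile PySem.Chars.isdigit := by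
  induction cs with
  | nil => simp [pvLoopA]
  | cons c cs ih =>
    by_cases hd : PySem.Chars.isdigit c
    · simp [pvLoopA, hd, pvLoopA_nonempty cs [c] (by simp)]
    · simp [pvLoopA, hd, ih]

theorem pvDropLenTakeWhile (p : Char → Bool) (s : List Char) :
    s.drop (s.takeWhile p).length = s.dropWhile p := by
  induction s with
  | nil => rfl
  | cons c cs ih =>
    by_cases hp : p c
    · simp [hp, ih]
    · simp [hp]

theorem pvTakeLenTakeWhile (p : Char → Bool) (s : List Char) :
    s.take (s.takeWhile p).length = s.takeWhile p := by
  induction s with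
  | nil => rfl
  | cons c cs ih =>
    by_cases hp : p c
    · simp [hp, ih]
    · simp [hp]

theorem pvSkipB_spec (s : List Char) : ∀ i : Nat,
    pvSkipB s i = i + ((s.drop i).takeWhile (fun c => !PySem.Chars.isdigit c)).length := by
  intro i
  induction i using pvSkipB.induct s with
  | case1 i h hd ih =>
    rw [pvSkipB, dif_pos h, if_pos hd, ih,
        List.drop_eq_getElem_cons h, List.takeWhile_cons, if_pos hd]
    simp [List.length_cons]
    omega
  | case2 i h hd =>
    rw [pvSkipB, dif_pos h, if_neg hd,
        List.drop_eq_getElem_cons h, List.takeWhile_cons, if_neg hd]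
    simp
  | case3 i h =>
    have hnil : s.drop i = [] := List.drop_eq_nil_of_le (by omega)
    rw [pvSkipB]
    simp [h, hnil]

theorem pvRunB_spec (s : List Char) : ∀ j : Nat,
    pvRunB s j = j + ((s.drop j).takeWhile PySem.Chars.isdigit).length := by
  intro j
  induction j using pvRunB.induct s with
  | case1 j h hd ih =>
    rw [pvRunB, dif_pos h, if_pos hd, ih,
        List.drop_eq_getElem_cons h, List.takeWhile_cons, if_pos hd]
    simp [List.length_cons]
    omega
  | case2 j h hd =>
    rw [pvRunB, dif_pos h, if_neg hd,
        List.drop_eq_getElem_cons h, List.takeWhile_cons, if_neg hd]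
    simp
  | case3 j h =>
    have hnil : s.drop j = [] := List.drop_eq_nil_of_le (by omega)
    rw [pvRunB]
    simp [h, hnil]

-- B's two index loops plus the slice compute the same first maximal digit run.
theorem pvAltDigits (s : List Char) :
    PySem.Chars.slice s (some ((pvSkipB s 0 : Nat) : Int)) (some ((pvRunB s (pvSkipB s 0) : Nat) : Int))
      = (s.dropWhile (fun c => !PySem.Chars.isdigit c)).takeWhile PySem.Chars.isdigit := by
  have hi : pvSkipB s 0 = (s.takeWhile (fun c => !PySem.Chars.isdigit c)).length := by
    simpa using pvSkipB_spec s 0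
  have hdrop : s.drop (pvSkipB s 0) = s.dropWhile (fun c => !PySem.Chars.isdigit c) := by
    rw [hi, pvDropLenTakeWhile]
  have hj := pvRunB_spec s (pvSkipB s 0)
  rw [PySem.Chars.slice_eq_listSlice, PySem.List.slice_natCast, hj,
      Nat.add_sub_cancel_left, hdrop, pvTakeLenTakeWhile]

-- ===== VERDICT (by name: the statement is the Claim_ definition above) =====
theorem extract_eval_year_spec : Claim_equal_extract_eval_year := by
  intro s _ _
  show extract_eval_year s = extract_eval_year_alt s
  unfold extract_eval_year extract_eval_year_alt
  simp only [pvLoopA_empty, pvAltDigits]
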